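-- pv_equiv track=rewrite | github.com/CyriacAzefack/Frailty_Box | Data_Drift/Behavior.py | time_periods_from_windows
-- ===== SOURCE A (Python) =====
-- def time_periods_from_windows(window_ids):
--     """
--     Compute the time period where a cluster is valid
--     :param window_ids: list of time_window id
--     :return:
--     """
--
--     time_periods = []
--     current_time_period = (window_ids[0],)
--
--     # Create time period interval
--     for i in range(len(window_ids) - 1):
--         if window_ids[i + 1] != window_ids[i] + 1:
--             current_time_period += (window_ids[i],)
--             time_periods.append(current_time_period)
--             current_time_period = (window_ids[i + 1],)
--     current_time_period += (window_ids[-1],)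
--     time_periods.append(current_time_period)
--
--     return time_periods
-- ===== SOURCE B (Python) =====
-- def time_periods_from_windows(window_ids):
--     """
--     Compute the time period where a cluster is valid (declarative form).
--     Returns [] on an empty list, where the original raises IndexError.
--     """
--     if not window_ids:
--         return []
--     pairs = list(zip(window_ids, window_ids[1:]))
--     starts = [window_ids[0]] + [b for a, b in pairs if b != a + 1]
--     ends = [a for a, b in pairs if b != a + 1] + [window_ids[-1]]
--     return list(zip(starts, ends))
-- ===== Notes on version B (the rewrite author's own statement) =====
-- stated objective: idiomatic
-- what changed: Replaces A's imperative start/accumulator state machine over indices with a declarative build: zip the list with its tail, filter the run-boundary pairs, and zip the run starts (head plus boundary seconds) with the run ends (boundary firsts plus last element).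
import Mathlib
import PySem

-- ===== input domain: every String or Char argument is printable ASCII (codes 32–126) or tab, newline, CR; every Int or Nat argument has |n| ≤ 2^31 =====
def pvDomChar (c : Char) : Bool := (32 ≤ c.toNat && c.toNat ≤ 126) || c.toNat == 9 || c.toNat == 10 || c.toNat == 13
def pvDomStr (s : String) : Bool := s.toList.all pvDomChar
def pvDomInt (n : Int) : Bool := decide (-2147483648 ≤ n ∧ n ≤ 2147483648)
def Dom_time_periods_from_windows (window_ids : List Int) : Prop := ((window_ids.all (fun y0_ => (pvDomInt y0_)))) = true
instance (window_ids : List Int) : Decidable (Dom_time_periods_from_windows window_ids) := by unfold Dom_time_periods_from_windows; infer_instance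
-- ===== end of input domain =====

-- B replaces A's start/accumulator state machine by a declarative build (boundary pairs
-- filtered out of the adjacent-pair list, then starts zipped with ends) — objective: idiomatic.

-- ===== PORT A =====
-- Literal port of A: fold over range(len-1), state = (time_periods, start of current run);
-- on an empty list Python raises IndexError reading the first element (pyGet? = none), excluded by Pre_.
def time_periods_from_windows (window_ids : List Int) : List (Int × Int) :=
  match PySem.List.pyGet? window_ids 0 with
  | none => []   -- IndexError in Python; outside Pre_
  | some w0 =>
    let st := (PySem.List.pyRange 0 ((window_ids.length : Int) - 1) 1).foldl
      (fun (acc : List (Int × Int) × Int) i =>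
        if PySem.List.pyGetD window_ids (i + 1) 0 ≠ PySem.List.pyGetD window_ids i 0 + 1 then
          (acc.1 ++ [(acc.2, PySem.List.pyGetD window_ids i 0)],
           PySem.List.pyGetD window_ids (i + 1) 0)
        else acc)
      (([] : List (Int × Int)), w0)
    st.1 ++ [(st.2, PySem.List.pyGetD window_ids (-1) 0)]

-- ===== PORT B =====
-- Literal port of Source B: zip adjacent pairs, filter the run boundaries,
-- starts = head :: boundary seconds, ends = boundary firsts ++ [last], zip them.
def time_periods_from_windows_alt (window_ids : List Int) : List (Int × Int) :=
  match window_ids with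
  | [] => []
  | w0 :: _ =>
    let pairs := window_ids.zip (PySem.List.slice window_ids (some 1) none)
    let starts := w0 :: (pairs.filter (fun p => p.2 ≠ p.1 + 1)).map (·.2)
    let ends := (pairs.filter (fun p => p.2 ≠ p.1 + 1)).map (·.1)
                  ++ [PySem.List.pyGetD window_ids (-1) 0]
    starts.zip ends

-- ===== PRECONDITION & SPEC =====
-- Pre_ excludes exactly the empty list, where A raises IndexError reading the first element.
def Pre_time_periods_from_windows (window_ids : List Int) : Prop := window_ids ≠ []
instance (window_ids : List Int) : Decidable (Pre_time_periods_from_windows window_ids) := by unfold Pre_time_periods_from_windows; infer_instance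
def pvWitness_time_periods_from_windows : List Int := [3, 4, 7]

def Spec_time_periods_from_windows (window_ids : List Int) (out : List (Int × Int)) : Prop := out = time_periods_from_windows_alt window_ids
instance (window_ids : List Int) (out : List (Int × Int)) : Decidable (Spec_time_periods_from_windows window_ids out) := by unfold Spec_time_periods_from_windows; infer_instance

-- ===== CLAIM (what is proved, stated in full; the proofs are below) =====
def Claim_equal_time_periods_from_windows : Prop := ∀ (window_ids : List Int), Dom_time_periods_from_windows window_ids → Pre_time_periods_from_windows window_ids → Spec_time_periods_from_windows window_ids (time_periods_from_windows window_ids)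

-- ===== LEMMAS AND PROOFS =====

-- A's loop step, on an adjacent pair (w[i], w[i+1]).
def pvStep (st : List (Int × Int) × Int) (p : Int × Int) : List (Int × Int) × Int :=
  if p.2 ≠ p.1 + 1 then (st.1 ++ [(st.2, p.1)], p.2) else st

-- canonical recursive description of the run decomposition (proof-only helper)
def pvRuns (cur prev : Int) : List Int → List (Int × Int)
  | [] => [(cur, prev)]
  | x :: rs => if x ≠ prev + 1 then (cur, prev) :: pvRuns x x rs else pvRuns cur x rs

lemma pvFoldA (rest : List Int) : ∀ (acc : List (Int × Int)) (cur prev : Int),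
    (((prev :: rest).zip rest).foldl pvStep (acc, cur)).1
      ++ [((((prev :: rest).zip rest).foldl pvStep (acc, cur)).2,
           (prev :: rest).getLast (by simp))]
    = acc ++ pvRuns cur prev rest := by
  induction rest with
  | nil => intro acc cur prev; simp [pvRuns]
  | cons x rs ih =>
    intro acc cur prev
    have hlast : (prev :: x :: rs).getLast (by simp) = (x :: rs).getLast (by simp) :=
      List.getLast_cons (by simp)
    rw [List.zip_cons_cons, List.foldl_cons, hlast]
    by_cases h : x = prev + 1
    · subst h
      have hstep : pvStep (acc, cur) (prev, prev + 1) = (acc, cur) := by simp [pvStep]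
      rw [hstep, ih acc cur (prev + 1)]
      simp [pvRuns]
    · have hstep : pvStep (acc, cur) (prev, x) = (acc ++ [(cur, prev)], x) := by
        simp [pvStep, h]
      rw [hstep, ih (acc ++ [(cur, prev)]) x x]
      simp [pvRuns, h]

lemma pvFoldB (rest : List Int) : ∀ (cur prev : Int),
    (cur :: (((prev :: rest).zip rest).filter (fun p => p.2 ≠ p.1 + 1)).map (·.2)).zip
      ((((prev :: rest).zip rest).filter (fun p => p.2 ≠ p.1 + 1)).map (·.1)
        ++ [(prev :: rest).getLast (by simp)])
    = pvRuns cur prev rest := by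
  induction rest with
  | nil => intro cur prev; simp [pvRuns]
  | cons x rs ih =>
    intro cur prev
    have hlast : (prev :: x :: rs).getLast (by simp) = (x :: rs).getLast (by simp) :=
      List.getLast_cons (by simp)
    rw [List.zip_cons_cons, hlast]
    by_cases h : x = prev + 1
    · subst h
      have hfil : List.filter (fun p => decide (p.2 ≠ p.1 + 1))
            ((prev, prev + 1) :: (((prev + 1) :: rs).zip rs))
          = List.filter (fun p => decide (p.2 ≠ p.1 + 1)) (((prev + 1) :: rs).zip rs) := by
        simp
      rw [hfil, ih cur (prev + 1)]
      simp [pvRuns]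
    · have hfil : List.filter (fun p => decide (p.2 ≠ p.1 + 1))
            ((prev, x) :: ((x :: rs).zip rs))
          = (prev, x) :: List.filter (fun p => decide (p.2 ≠ p.1 + 1)) ((x :: rs).zip rs) := by
        simp [h]
      rw [hfil, List.map_cons, List.map_cons, List.cons_append, List.zip_cons_cons, ih x x]
      simp [pvRuns, h]

-- A's index-based fold equals the fold of pvStep over the adjacent-pair list.
lemma pvIdxFold (w0 : Int) (rest : List Int) (init : List (Int × Int) × Int) :
    (PySem.List.pyRange 0 (((w0 :: rest).length : Int) - 1) 1).foldl
      (fun (acc : List (Int × Int) × Int) i =>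
        if PySem.List.pyGetD (w0 :: rest) (i + 1) 0 ≠ PySem.List.pyGetD (w0 :: rest) i 0 + 1 then
          (acc.1 ++ [(acc.2, PySem.List.pyGetD (w0 :: rest) i 0)],
           PySem.List.pyGetD (w0 :: rest) (i + 1) 0)
        else acc) init
    = ((w0 :: rest).zip rest).foldl pvStep init := by
  have hlen : (((w0 :: rest).length : Int) - 1) = (((w0 :: rest).zip rest).length : Int) := by
    simp [List.length_zip]
  rw [hlen]
  have hlib := PySem.List.foldl_pyRange_pyGetD' ((w0 :: rest).zip rest) (0, 0) pvStep init (le_refl 0)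
  simp only [Int.toNat_zero, List.drop_zero] at hlib
  rw [← hlib]
  apply PySem.List.foldl_congr_mem
  intro acc i hi
  have hmem := hi
  rw [PySem.List.mem_pyRange_one] at hmem
  obtain ⟨h0, h1⟩ := hmem
  have hzlen : ((w0 :: rest).zip rest).length = rest.length := by simp [List.length_zip]
  have h1' : i < (rest.length : Int) := by rw [hzlen] at h1; exact_mod_cast h1
  have hz : PySem.List.pyGetD ((w0 :: rest).zip rest) i (0, 0)
      = ((w0 :: rest)[i.toNat]'(by simp; omega), rest[i.toNat]'(by omega)) := by
    rw [PySem.List.pyGetD_eq_getElem _ _ h0 (by rw [hzlen]; exact_mod_cast h1')]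
    exact List.getElem_zip
  have hg1 : PySem.List.pyGetD (w0 :: rest) i 0 = (w0 :: rest)[i.toNat]'(by simp; omega) :=
    PySem.List.pyGetD_eq_getElem _ _ h0 (by simp; omega)
  have hg2 : PySem.List.pyGetD (w0 :: rest) (i + 1) 0 = rest[i.toNat]'(by omega) := by
    rw [PySem.List.pyGetD_eq_getElem _ _ (by omega) (by simp; omega)]
    have : (i + 1).toNat = i.toNat + 1 := by omega
    simp [this]
  rw [hz, hg1, hg2]
  simp [pvStep]

-- ===== VERDICT (by name: the statement is the Claim_ definition above) =====
theorem time_periods_from_windows_spec : Claim_equal_time_periods_from_windows := by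
  intro window_ids _ hpre
  unfold Spec_time_periods_from_windows
  match window_ids, hpre with
  | w0 :: rest, _ =>
    show time_periods_from_windows (w0 :: rest) = time_periods_from_windows_alt (w0 :: rest)
    have hlast : PySem.List.pyGetD (w0 :: rest) (-1) 0 = (w0 :: rest).getLast (by simp) :=
      PySem.List.pyGetD_neg_one _ _ (by simp)
    unfold time_periods_from_windows time_periods_from_windows_alt
    simp only [PySem.List.slice_from_one, List.tail_cons]
    have hget : PySem.List.pyGet? (w0 :: rest) 0 = some w0 := by
      simp [PySem.List.pyGet?, PySem.List.pyIdx?]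
    rw [hget]
    simp only [pvIdxFold w0 rest ([], w0), hlast]
    rw [pvFoldA rest [] w0 w0, List.nil_append, ← pvFoldB rest w0 w0]
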